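-- pv_equiv track=rewrite | github.com/pypi-data/pypi-mirror-98 | packages/network-serializer/network-serializer-0.6.2.tar.gz/network-serializer-0.6.2/network-serializer/network-serializer.py | countNumberOfFieldsInFormatString
-- ===== SOURCE A (Python) =====
-- def countNumberOfFieldsInFormatString(inString):
--     '''
--     # counts the number of fields in the input string to know how many args to pass to struct.pack()
--     # returns that count
--     '''
--     count = 0
--     subcount = 0
--     wasLastCharANum = False
--     for character in inString:
--         if character != '!' and character != '<' and character != '>' and character != '@' and character != '=': # we don't want to count a special character, since they're not fields
--             if character.isdigit(): # if it's a number, add that to the sum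
--                 subcount *= 10
--                 subcount += int(character)
--                 wasLastCharANum = True
--             elif character == 's' or character == 'u': # if it's 's' or 'u', the number in front doesn't change the number of fields, so reset the sub count and increment the count
--                 count += 1
--                 subcount = 0
--                 wasLastCharANum = False
--             elif not wasLastCharANum: # if a letter didn't have a number before it, increment the count
--                 count += 1
--             else: # if a letter had a number before it, add the sum to the count but DON'T add the letter itself
--                 count += subcount
--                 subcount = 0
--                 wasLastCharANum = False
--     return count
-- ===== SOURCE B (Python) =====
-- def countNumberOfFieldsInFormatString(inString):
--     # Two-phase: strip byte-order chars, then tokenize into (digit-run, symbol) pairs.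
--     cleaned = [c for c in inString if c not in '!<>@=']
--     count = 0
--     i = 0
--     n = len(cleaned)
--     while i < n:
--         j = i
--         while j < n and cleaned[j].isdigit():
--             j += 1
--         if j == n:      # trailing digits with no symbol: discarded
--             break
--         sym = cleaned[j]
--         if sym == 's' or sym == 'u' or j == i:
--             count += 1
--         else:
--             count += int(''.join(cleaned[i:j]))
--         i = j + 1
--     return count
-- ===== Notes on version B (the rewrite author's own statement) =====
-- stated objective: alternative
-- what changed: Replaces A's single-pass three-variable state machine (count/subcount/wasLastCharANum) with two phases: filter out the byte-order characters, then tokenize the remainder into (digit-run, symbol) pairs and sum each token's contribution.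
import Mathlib
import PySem

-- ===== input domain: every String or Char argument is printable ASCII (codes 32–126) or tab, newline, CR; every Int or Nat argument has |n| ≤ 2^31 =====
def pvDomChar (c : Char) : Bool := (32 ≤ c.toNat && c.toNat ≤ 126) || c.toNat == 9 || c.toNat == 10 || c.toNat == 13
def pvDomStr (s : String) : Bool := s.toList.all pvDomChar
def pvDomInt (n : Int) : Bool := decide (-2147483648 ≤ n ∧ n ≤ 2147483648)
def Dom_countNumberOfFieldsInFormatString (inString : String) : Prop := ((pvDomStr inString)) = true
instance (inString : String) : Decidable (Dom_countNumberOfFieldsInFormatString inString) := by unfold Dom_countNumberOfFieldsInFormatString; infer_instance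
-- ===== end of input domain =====

-- B replaces A's one-pass state machine by two phases (filter out byte-order chars, then
-- tokenize into digit-run/symbol pairs); an alternative decomposition, same cost.

-- ===== PORT A =====
-- state = (count, subcount, wasLastCharANum); one fold over the characters, as A loops.
def pvAStep (st : Int × Int × Bool) (character : Char) : Int × Int × Bool :=
  if character ≠ '!' ∧ character ≠ '<' ∧ character ≠ '>' ∧ character ≠ '@' ∧ character ≠ '=' then
    if character.isDigit then
      (st.1, st.2.1 * 10 + ((character.toNat : Int) - 48), true)
    else if character = 's' ∨ character = 'u' then
      (st.1 + 1, 0, false)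
    else if ¬ st.2.2 then
      (st.1 + 1, st.2.1, st.2.2)
    else
      (st.1 + st.2.1, 0, false)
  else st

def countNumberOfFieldsInFormatString (inString : String) : Int :=
  (inString.toList.foldl pvAStep (0, 0, false)).1

-- ===== PORT B =====
-- `c not in '!<>@='`
def pvNotSpecial (c : Char) : Bool :=
  ¬ (c = '!' ∨ c = '<' ∨ c = '>' ∨ c = '@' ∨ c = '=')

-- inner while loop of B: split off the leading digit run
def pvSplitDigits : List Char → List Char × List Char
  | [] => ([], [])
  | c :: rest =>
      if c.isDigit then
        let p := pvSplitDigits rest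
        (c :: p.1, p.2)
      else ([], c :: rest)

-- int(''.join(digits)): value of a digit run
def pvDigitsVal (ds : List Char) : Int :=
  ds.foldl (fun a c => a * 10 + ((c.toNat : Int) - 48)) 0

theorem pvSplitDigits_len (l : List Char) : (pvSplitDigits l).2.length ≤ l.length := by
  induction l with
  | nil => simp [pvSplitDigits]
  | cons c rest ih =>
      simp only [pvSplitDigits]
      split
      · simpa using Nat.le_succ_of_le ih
      · simp

-- outer while loop of B: consume one (digit-run, symbol) token per step
def pvBLoop (l : List Char) : Int :=
  match h : pvSplitDigits l with
  | (_, []) => 0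
  | (d, sym :: rest) =>
      (if sym = 's' ∨ sym = 'u' ∨ d = [] then 1 else pvDigitsVal d) + pvBLoop rest
termination_by l.length
decreasing_by
  have := pvSplitDigits_len l
  rw [h] at this
  simp at this
  omega

def countNumberOfFieldsInFormatString_alt (inString : String) : Int :=
  pvBLoop (inString.toList.filter pvNotSpecial)

-- ===== PRECONDITION & SPEC =====
def Spec_countNumberOfFieldsInFormatString (inString : String) (out : Int) : Prop := out = countNumberOfFieldsInFormatString_alt inString
instance (inString : String) (out : Int) : Decidable (Spec_countNumberOfFieldsInFormatString inString out) := by unfold Spec_countNumberOfFieldsInFormatString; infer_instance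

-- ===== CLAIM (what is proved, stated in full; the proofs are below) =====
def Claim_equal_countNumberOfFieldsInFormatString : Prop := ∀ (inString : String), Dom_countNumberOfFieldsInFormatString inString → Spec_countNumberOfFieldsInFormatString inString (countNumberOfFieldsInFormatString inString)

-- ===== LEMMAS AND PROOFS =====

-- A's step restricted to non-special characters
def pvStep' (st : Int × Int × Bool) (c : Char) : Int × Int × Bool :=
  if c.isDigit then
    (st.1, st.2.1 * 10 + ((c.toNat : Int) - 48), true)
  else if c = 's' ∨ c = 'u' then
    (st.1 + 1, 0, false)
  else if ¬ st.2.2 then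
    (st.1 + 1, st.2.1, st.2.2)
  else
    (st.1 + st.2.1, 0, false)

theorem pvFoldFilter (l : List Char) (st : Int × Int × Bool) :
    l.foldl pvAStep st = (l.filter pvNotSpecial).foldl pvStep' st := by
  induction l generalizing st with
  | nil => rfl
  | cons c rest ih =>
      by_cases h : pvNotSpecial c = true
      · have hc : (c ≠ '!' ∧ c ≠ '<' ∧ c ≠ '>' ∧ c ≠ '@' ∧ c ≠ '=') := by
          simp [pvNotSpecial] at h; tauto
        simp only [List.foldl_cons, List.filter_cons, h, if_pos]
        rw [show pvAStep st c = pvStep' st c by simp [pvAStep, pvStep', hc]]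
        exact ih _
      · have hc : ¬ (c ≠ '!' ∧ c ≠ '<' ∧ c ≠ '>' ∧ c ≠ '@' ∧ c ≠ '=') := by
          simp [pvNotSpecial] at h; tauto
        simp only [List.foldl_cons, List.filter_cons, h]
        rw [show pvAStep st c = st by simp [pvAStep, hc]]
        exact ih st

-- common spec: pvS = count starting fresh, pvSD v = count with an open digit run of value v
mutual
def pvS : List Char → Int
  | [] => 0
  | c :: cs =>
      if c.isDigit then pvSD ((c.toNat : Int) - 48) cs
      else 1 + pvS cs
def pvSD (v : Int) : List Char → Int
  | [] => 0
  | c :: cs =>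
      if c.isDigit then pvSD (v * 10 + ((c.toNat : Int) - 48)) cs
      else if c = 's' ∨ c = 'u' then 1 + pvS cs
      else v + pvS cs
end

theorem pvA_eq_S (l : List Char) :
    (∀ n : Int, (l.foldl pvStep' (n, 0, false)).1 = n + pvS l) ∧
    (∀ n v : Int, (l.foldl pvStep' (n, v, true)).1 = n + pvSD v l) := by
  induction l with
  | nil => simp [pvS, pvSD]
  | cons c cs ih =>
      constructor
      · intro n
        by_cases hd : c.isDigit
        · simp [pvStep', hd, pvS, ih.2]
        · by_cases hsu : c = 's' ∨ c = 'u'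
          · simp [pvStep', hd, hsu, pvS, ih.1]; ring
          · simp [pvStep', hd, hsu, pvS, ih.1]; ring
      · intro n v
        by_cases hd : c.isDigit
        · simp [pvStep', hd, pvSD, ih.2]
        · by_cases hsu : c = 's' ∨ c = 'u'
          · simp [pvStep', hd, hsu, pvSD, ih.1]; ring
          · simp [pvStep', hd, hsu, pvSD, ih.1]; ring

-- value of a digit run continued from accumulator v
def pvDigitsValFrom (v : Int) (ds : List Char) : Int :=
  ds.foldl (fun a c => a * 10 + ((c.toNat : Int) - 48)) v

theorem pvSD_split (cs : List Char) : ∀ v : Int,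
    pvSD v cs = match pvSplitDigits cs with
      | (_, []) => 0
      | (d, sym :: rest) =>
          (if sym = 's' ∨ sym = 'u' then 1 else pvDigitsValFrom v d) + pvS rest := by
  induction cs with
  | nil => intro v; simp [pvSD, pvSplitDigits]
  | cons c cs ih =>
      intro v
      by_cases hd : c.isDigit
      · simp only [pvSD, hd, if_pos, pvSplitDigits]
        rw [ih]
        rcases h : pvSplitDigits cs with ⟨d, r⟩
        cases r with
        | nil => simp
        | cons sym rest => simp [pvDigitsValFrom]
      · simp only [pvSD, hd, pvSplitDigits, Bool.false_eq_true]
        by_cases hsu : c = 's' ∨ c = 'u'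
        · simp [hsu]
        · simp [hsu, pvDigitsValFrom]

theorem pvB_eq_S_aux : ∀ n : Nat, ∀ l : List Char, l.length ≤ n → pvBLoop l = pvS l := by
  intro n
  induction n with
  | zero =>
      intro l hl
      have : l = [] := by cases l <;> simp_all
      subst this
      rw [pvBLoop.eq_def]; simp [pvSplitDigits, pvS]
  | succ n ih =>
      intro l hl
      cases l with
      | nil => rw [pvBLoop.eq_def]; simp [pvSplitDigits, pvS]
      | cons c cs =>
          by_cases hd : c.isDigit
          · rcases h : pvSplitDigits cs with ⟨d, r⟩
            have hsp : pvSplitDigits (c :: cs) = (c :: d, r) := by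
              simp [pvSplitDigits, hd, h]
            cases r with
            | nil =>
                rw [pvBLoop.eq_def, hsp]
                simp only [pvS, hd, if_pos]
                rw [pvSD_split, h]
            | cons sym rest =>
                rw [pvBLoop.eq_def, hsp]
                show (if sym = 's' ∨ sym = 'u' ∨ c :: d = [] then (1:Int)
                    else pvDigitsVal (c :: d)) + pvBLoop rest = pvS (c :: cs)
                have hlen : rest.length ≤ n := by
                  have := pvSplitDigits_len cs
                  rw [h] at this
                  simp at this hl
                  omega
                rw [ih rest hlen]
                simp only [pvS, hd, if_pos]
                rw [pvSD_split, h]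
                by_cases hsu : sym = 's' ∨ sym = 'u'
                · simp [hsu]
                · simp [hsu, pvDigitsVal, pvDigitsValFrom]
          · have hsp : pvSplitDigits (c :: cs) = ([], c :: cs) := by
              simp [pvSplitDigits, hd]
            rw [pvBLoop.eq_def, hsp]
            show (if c = 's' ∨ c = 'u' ∨ ([] : List Char) = [] then (1:Int)
                else pvDigitsVal []) + pvBLoop cs = pvS (c :: cs)
            simp only [pvS, hd, Bool.false_eq_true, if_false]
            rw [ih cs (by simp at hl; omega)]
            simp

theorem pvB_eq_S (l : List Char) : pvBLoop l = pvS l :=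
  pvB_eq_S_aux l.length l le_rfl

-- ===== VERDICT (by name: the statement is the Claim_ definition above) =====
theorem countNumberOfFieldsInFormatString_spec : Claim_equal_countNumberOfFieldsInFormatString := by
  intro s _
  unfold Spec_countNumberOfFieldsInFormatString countNumberOfFieldsInFormatString
    countNumberOfFieldsInFormatString_alt
  rw [pvFoldFilter, (pvA_eq_S _).1 0, pvB_eq_S]
  ring
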